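-- pv_equiv track=rewrite | github.com/Ali-J-Fesharaki/Map2Gz | pgm_to_sdf.py | find_rectangular_walls
-- ===== SOURCE A (Python) =====
-- def find_rectangular_walls(wall_positions):
--     """Find rectangular wall segments from individual wall pixels"""
--     if not wall_positions:
--         return []
--
--     # Convert to set for O(1) lookup
--     wall_set = set(wall_positions)
--     processed = set()
--     rectangles = []
--
--     for x, y in wall_positions:
--         if (x, y) in processed:
--             continue
--
--         # Try to grow a rectangle starting from this pixel
--         # First, find the maximum width (horizontal extent)
--         max_width = 1
--         while (x + max_width, y) in wall_set:
--             max_width += 1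
--
--         # For each possible width, find the maximum height
--         best_rect = {'x': x, 'y': y, 'width': 1, 'height': 1}
--         best_area = 1
--
--         for width in range(1, max_width + 1):
--             # Check if we can extend vertically
--             height = 1
--             while height <= 1000:  # reasonable limit
--                 # Check if all pixels in this row exist
--                 valid_row = True
--                 for dx in range(width):
--                     if (x + dx, y + height) not in wall_set:
--                         valid_row = False
--                         break
--
--                 if not valid_row:
--                     break
--                 height += 1
--
--             area = width * height
--             if area > best_area:
--                 best_area = area
--                 best_rect = {'x': x, 'y': y, 'width': width, 'height': height}
--
--         # Mark all pixels in this rectangle as processed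
--         for dx in range(best_rect['width']):
--             for dy in range(best_rect['height']):
--                 processed.add((x + dx, y + dy))
--
--         rectangles.append(best_rect)
--
--     return rectangles
-- ===== SOURCE B (Python) =====
-- def find_rectangular_walls(wall_positions):
--     """Find rectangular wall segments from individual wall pixels.
--
--     Same greedy cover, but the best rectangle per start pixel is chosen from
--     per-column downward run lengths with a running minimum, instead of
--     re-scanning every row of every candidate width.
--     """
--     wall_set = set(wall_positions)
--     processed = set()
--     rectangles = []
--     for x, y in wall_positions:
--         if (x, y) in processed:
--             continue
--         max_width = 1
--         while (x + max_width, y) in wall_set: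
--             max_width += 1
--         # downward run (rows including the top one, capped at 1001) per column
--         runs = []
--         for dx in range(max_width):
--             h = 1
--             while h <= 1000 and (x + dx, y + h) in wall_set:
--                 h += 1
--             runs.append(h)
--         best_w, best_h, best_area = 1, 1, 1
--         w, m = 0, 1001  # m = running min of runs (a run never exceeds 1001)
--         for r in runs:
--             w += 1
--             m = min(m, r)
--             if w * m > best_area:
--                 best_w, best_h, best_area = w, m, w * m
--         for dx in range(best_w):
--             for dy in range(best_h):
--                 processed.add((x + dx, y + dy))
--         rectangles.append({'x': x, 'y': y, 'width': best_w, 'height': best_h})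
--     return rectangles
-- ===== Notes on version B (the rewrite author's own statement) =====
-- stated objective: faster
-- what changed: Per start pixel, B computes each column's downward run length once and sweeps candidate widths with a running minimum, instead of A's re-scan of every row of every candidate width.
import Mathlib
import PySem

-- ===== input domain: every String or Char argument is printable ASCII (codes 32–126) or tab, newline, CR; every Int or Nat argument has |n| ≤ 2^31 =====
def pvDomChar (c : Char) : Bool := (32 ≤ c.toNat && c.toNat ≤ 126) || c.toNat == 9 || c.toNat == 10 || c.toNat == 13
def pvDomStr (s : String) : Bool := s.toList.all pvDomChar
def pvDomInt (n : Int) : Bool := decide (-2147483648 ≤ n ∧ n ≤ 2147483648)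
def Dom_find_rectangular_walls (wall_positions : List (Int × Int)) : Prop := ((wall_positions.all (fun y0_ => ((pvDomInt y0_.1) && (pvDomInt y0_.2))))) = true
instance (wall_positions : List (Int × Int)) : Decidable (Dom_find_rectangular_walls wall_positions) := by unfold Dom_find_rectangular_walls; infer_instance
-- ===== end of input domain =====

-- B replaces A's per-width row-by-row height rescans with per-column downward run
-- lengths and a running minimum (objective: faster; same greedy result).

-- ===== PORT A =====
-- shared by both ports: the 'while (x+max_width, y) in wall_set: max_width += 1' loop,
-- identical in Source A and Source B; fuel s.length+1 suffices (each step needs a fresh distinct member)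
def maxWidthLoop (s : PySem.Set (Int × Int)) (x y : Int) : Nat → Nat → Nat
  | 0, mw => mw
  | fuel + 1, mw => if PySem.Set.contains s (x + (mw : Int), y) then maxWidthLoop s x y fuel (mw + 1) else mw

-- A's inner 'while height <= 1000: check the whole row' loop
def heightLoopA (s : PySem.Set (Int × Int)) (x y : Int) (w : Nat) (h : Nat) : Nat :=
  if h ≤ 1000 then
    if (List.range w).all (fun dx => PySem.Set.contains s (x + (dx : Int), y + (h : Int))) then
      heightLoopA s x y w (h + 1)
    else h
  else h
termination_by 1001 - h

-- A's 'for width in range(1, max_width+1)' best-rectangle selection (best_rect dict, best_area)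
def bestLoopA (s : PySem.Set (Int × Int)) (x y : Int) (mw : Nat) : PySem.Dict String Int × Nat :=
  (List.range mw).foldl
    (fun st i =>
      let w := i + 1
      let h := heightLoopA s x y w 1
      if w * h > st.2 then (PySem.Dict.mk [("x", x), ("y", y), ("width", (w : Int)), ("height", (h : Int))], w * h)
      else st)
    (PySem.Dict.mk [("x", x), ("y", y), ("width", (1 : Int)), ("height", (1 : Int))], 1)

-- A's 'for dx in range(best_rect['width']): for dy in range(best_rect['height']): processed.add(…)'
def markA (p : PySem.Set (Int × Int)) (x y wi hi : Int) : PySem.Set (Int × Int) :=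
  (PySem.List.pyRange 0 wi 1).foldl
    (fun p dx => (PySem.List.pyRange 0 hi 1).foldl (fun p dy => PySem.Set.add p (x + dx, y + dy)) p) p

def stepA (ws : PySem.Set (Int × Int)) (st : PySem.Set (Int × Int) × List (List (String × Int)))
    (xy : Int × Int) : PySem.Set (Int × Int) × List (List (String × Int)) :=
  if PySem.Set.contains st.1 (xy.1, xy.2) then st
  else
    let mw := maxWidthLoop ws xy.1 xy.2 (ws.length + 1) 1
    let br := bestLoopA ws xy.1 xy.2 mw
    -- 'best_rect['width']' / '['height']' ported with getD: the keys are always present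
    let wi := PySem.Dict.getD br.1 "width" 0
    let hi := PySem.Dict.getD br.1 "height" 0
    (markA st.1 xy.1 xy.2 wi hi, st.2 ++ [br.1.items])

def find_rectangular_walls (wall_positions : List (Int × Int)) : List (List (String × Int)) :=
  if wall_positions = [] then []
  else
    let ws := PySem.Set.ofList wall_positions
    (wall_positions.foldl (stepA ws) (PySem.Set.empty, [])).2

-- ===== PORT B =====
-- B's 'h = 1; while h <= 1000 and (x+dx, y+h) in wall_set: h += 1' (downward run of one column)
def colrun (s : PySem.Set (Int × Int)) (x0 y0 : Int) (h : Nat) : Nat :=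
  if decide (h ≤ 1000) && PySem.Set.contains s (x0, y0 + (h : Int)) then colrun s x0 y0 (h + 1)
  else h
termination_by 1001 - h
decreasing_by
  rename_i hc
  have h1 : h ≤ 1000 := by
    have := (Bool.and_eq_true _ _).mp hc |>.1
    simpa using this
  omega

-- B's 'for r in runs' : w += 1; m = min(m, r); if w*m > best_area: …' running-minimum sweep
def selB (runs : List Nat) : Nat × Nat :=
  let st := runs.foldl
    (fun (st : Nat × Nat × Nat × Nat × Nat) r =>
      let w := st.1 + 1
      let m := min st.2.1 r
      if w * m > st.2.2.2.2 then (w, m, w, m, w * m) else (w, m, st.2.2.1, st.2.2.2.1, st.2.2.2.2))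
    (0, 1001, 1, 1, 1)
  (st.2.2.1, st.2.2.2.1)

-- B's 'for dx in range(best_w): for dy in range(best_h): processed.add(…)'
def markB (p : PySem.Set (Int × Int)) (x y : Int) (bw bh : Nat) : PySem.Set (Int × Int) :=
  (List.range bw).foldl
    (fun p dx => (List.range bh).foldl (fun p dy => PySem.Set.add p (x + ((dx : Nat) : Int), y + ((dy : Nat) : Int))) p) p

def stepB (ws : PySem.Set (Int × Int)) (st : PySem.Set (Int × Int) × List (List (String × Int)))
    (xy : Int × Int) : PySem.Set (Int × Int) × List (List (String × Int)) :=
  if PySem.Set.contains st.1 (xy.1, xy.2) then st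
  else
    let mw := maxWidthLoop ws xy.1 xy.2 (ws.length + 1) 1
    let runs := (List.range mw).map (fun dx => colrun ws (xy.1 + ((dx : Nat) : Int)) xy.2 1)
    let bwh := selB runs
    (markB st.1 xy.1 xy.2 bwh.1 bwh.2,
     st.2 ++ [[("x", xy.1), ("y", xy.2), ("width", (bwh.1 : Int)), ("height", (bwh.2 : Int))]])

def find_rectangular_walls_alt (wall_positions : List (Int × Int)) : List (List (String × Int)) :=
  let ws := PySem.Set.ofList wall_positions
  (wall_positions.foldl (stepB ws) (PySem.Set.empty, [])).2

-- ===== PRECONDITION & SPEC =====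
def Spec_find_rectangular_walls (wall_positions : List (Int × Int)) (out : List (List (String × Int))) : Prop := out = find_rectangular_walls_alt wall_positions
instance (wall_positions : List (Int × Int)) (out : List (List (String × Int))) : Decidable (Spec_find_rectangular_walls wall_positions out) := by unfold Spec_find_rectangular_walls; infer_instance

-- ===== CLAIM (what is proved, stated in full; the proofs are below) =====
def Claim_equal_find_rectangular_walls : Prop := ∀ (wall_positions : List (Int × Int)), Dom_find_rectangular_walls wall_positions → Spec_find_rectangular_walls wall_positions (find_rectangular_walls wall_positions)

-- ===== LEMMAS AND PROOFS =====

-- folding min over a list whose elements all dominate the seed leaves the seed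
theorem foldl_min_const (l : List Nat) (a : Nat) (h : ∀ x ∈ l, a ≤ x) : l.foldl min a = a := by
  induction l with
  | nil => rfl
  | cons y l ih =>
      simp only [List.foldl_cons]
      have : min a y = a := Nat.min_eq_left (h y (by simp))
      rw [this]
      exact ih (fun x hx => h x (by simp [hx]))

-- folding min over a list all ≥ h that contains h, from a seed ≥ h, yields h
theorem foldl_min_mem (l : List Nat) (a h : Nat) (ha : h ≤ a) (hall : ∀ x ∈ l, h ≤ x)
    (hmem : h ∈ l) : l.foldl min a = h := by
  induction l generalizing a with
  | nil => cases hmem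
  | cons y l ih =>
      simp only [List.foldl_cons]
      rcases List.mem_cons.mp hmem with hy | hl
      · subst hy
        rw [Nat.min_eq_right ha]
        exact foldl_min_const l h (fun x hx => hall x (by simp [hx]))
      · exact ih (min a y) (Nat.le_min.mpr ⟨ha, hall y (by simp)⟩) (fun x hx => hall x (by simp [hx])) hl

theorem colrun_ge (s : PySem.Set (Int × Int)) (x0 y0 : Int) (h : Nat) : h ≤ colrun s x0 y0 h := by
  rw [colrun.eq_def]
  split
  · exact le_trans (Nat.le_succ h) (colrun_ge s x0 y0 (h + 1))
  · exact le_refl h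
termination_by 1001 - h
decreasing_by
  rename_i hc
  have h1 : h ≤ 1000 := by
    have := (Bool.and_eq_true _ _).mp hc |>.1
    simpa using this
  omega

theorem colrun_stop (s : PySem.Set (Int × Int)) (x0 y0 : Int) (h : Nat)
    (hc : ¬ (decide (h ≤ 1000) && PySem.Set.contains s (x0, y0 + (h : Int))) = true) :
    colrun s x0 y0 h = h := by
  rw [colrun.eq_def]; simp only [if_neg hc]

-- A's row-scanning height loop equals the min (seeded with 1001) of B's per-column runs
theorem heightLoopA_eq_min (s : PySem.Set (Int × Int)) (x y : Int) (w : Nat) (h : Nat)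
    (hh : h ≤ 1001) :
    heightLoopA s x y w h = ((List.range w).map (fun dx => colrun s (x + ((dx : Nat) : Int)) y h)).foldl min 1001 := by
  by_cases h1000 : h ≤ 1000
  · by_cases hrow : ((List.range w).all (fun dx => PySem.Set.contains s (x + (dx : Int), y + (h : Int)))) = true
    · -- whole row present: every colrun steps to h+1, the loop recurses
      rw [heightLoopA.eq_def, if_pos h1000, if_pos hrow]
      rw [heightLoopA_eq_min s x y w (h + 1) (by omega)]
      have hmap : (List.range w).map (fun dx => colrun s (x + ((dx : Nat) : Int)) y h)
          = (List.range w).map (fun dx => colrun s (x + ((dx : Nat) : Int)) y (h + 1)) := by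
        apply List.map_congr_left
        intro dx hdx
        have hc : PySem.Set.contains s (x + (dx : Int), y + (h : Int)) = true :=
          (List.all_eq_true.mp hrow) dx hdx
        have hm : (x + ((dx : Nat) : Int), y + (h : Int)) ∈ s := List.mem_of_elem_eq_true hc
        conv_lhs => rw [colrun.eq_def]
        simp [h1000, hm]
      rw [hmap]
    · -- some column fails at h: that colrun equals h, all runs ≥ h, seed 1001 ≥ h
      rw [heightLoopA.eq_def, if_pos h1000, if_neg hrow]
      have hex : ∃ dx, dx ∈ List.range w ∧ PySem.Set.contains s (x + (dx : Int), y + (h : Int)) = false := by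
        by_contra hcon
        simp only [not_exists, not_and] at hcon
        apply hrow
        rw [List.all_eq_true]
        intro dx hdx
        cases hb : PySem.Set.contains s (x + (dx : Int), y + (h : Int)) with
        | true => rfl
        | false => exact absurd hb (hcon dx hdx)
      obtain ⟨dx, hdx, hfail⟩ := hex
      symm
      apply foldl_min_mem _ _ _ (by omega)
      · intro z hz
        obtain ⟨dx', _, rfl⟩ := List.mem_map.mp hz
        exact colrun_ge s (x + (dx' : Int)) y h
      · apply List.mem_map.mpr
        refine ⟨dx, hdx, ?_⟩
        have hnm : (x + ((dx : Nat) : Int), y + (h : Int)) ∉ s := by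
          intro hm
          have hc2 : PySem.Set.contains s (x + ((dx : Nat) : Int), y + (h : Int)) = true :=
            List.elem_eq_true_of_mem hm
          rw [hc2] at hfail
          simp at hfail
        apply colrun_stop
        simp [hnm]
  · -- h = 1001: the loop returns h, and every colrun also returns h = 1001
    rw [heightLoopA.eq_def, if_neg h1000]
    have h1001 : h = 1001 := by omega
    symm
    have hall : ∀ z ∈ (List.range w).map (fun dx => colrun s (x + ((dx : Nat) : Int)) y h), h ≤ z := by
      intro z hz
      obtain ⟨dx', _, rfl⟩ := List.mem_map.mp hz
      exact colrun_ge s _ _ _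
    subst h1001
    exact foldl_min_const _ _ hall
termination_by 1001 - h

-- proof-only abbreviations for B's sweep (definitionally the fold inside selB)
def bstep (st : Nat × Nat × Nat × Nat × Nat) (r : Nat) : Nat × Nat × Nat × Nat × Nat :=
  let w := st.1 + 1
  let m := min st.2.1 r
  if w * m > st.2.2.2.2 then (w, m, w, m, w * m) else (w, m, st.2.2.1, st.2.2.2.1, st.2.2.2.2)

def bruns (s : PySem.Set (Int × Int)) (x y : Int) (k : Nat) : List Nat :=
  (List.range k).map (fun dx => colrun s (x + ((dx : Nat) : Int)) y 1)

def bSt (s : PySem.Set (Int × Int)) (x y : Int) (k : Nat) : Nat × Nat × Nat × Nat × Nat :=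
  (bruns s x y k).foldl bstep (0, 1001, 1, 1, 1)

-- A's best-rectangle fold equals B's running-minimum sweep over the run list
theorem best_eq (s : PySem.Set (Int × Int)) (x y : Int) (k : Nat) :
    (bSt s x y k).1 = k ∧ (bSt s x y k).2.1 = (bruns s x y k).foldl min 1001 ∧
      bestLoopA s x y k =
        (PySem.Dict.mk [("x", x), ("y", y), ("width", ((bSt s x y k).2.2.1 : Int)),
          ("height", ((bSt s x y k).2.2.2.1 : Int))], (bSt s x y k).2.2.2.2) := by
  induction k with
  | zero => exact ⟨rfl, rfl, rfl⟩
  | succ k ih =>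
      obtain ⟨hw, hm, hA⟩ := ih
      have hruns : bruns s x y (k + 1) = bruns s x y k ++ [colrun s (x + ((k : Nat) : Int)) y 1] := by
        unfold bruns
        rw [List.range_succ, List.map_append]
        rfl
      have hSt : bSt s x y (k + 1) = bstep (bSt s x y k) (colrun s (x + ((k : Nat) : Int)) y 1) := by
        unfold bSt
        rw [hruns, List.foldl_append]
        rfl
      -- A's freshly recomputed height at width k+1 equals B's updated running minimum
      have hh : heightLoopA s x y (k + 1) 1 =
          min (bSt s x y k).2.1 (colrun s (x + ((k : Nat) : Int)) y 1) := by
        rw [heightLoopA_eq_min s x y (k + 1) 1 (by omega), hm]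
        show (bruns s x y (k + 1)).foldl min 1001 = _
        rw [hruns, List.foldl_append]
        rfl
      have hBL : bestLoopA s x y (k + 1) =
          (fun st i =>
            let w := i + 1
            let h := heightLoopA s x y w 1
            if w * h > st.2 then
              (PySem.Dict.mk [("x", x), ("y", y), ("width", (w : Int)), ("height", (h : Int))], w * h)
            else st)
          (bestLoopA s x y k) k := by
        unfold bestLoopA
        rw [List.range_succ, List.foldl_append]
        rfl
      rcases hbs : bSt s x y k with ⟨w0, m0, bw0, bh0, ba0⟩
      rw [hbs] at hw hm hA hSt hh
      simp only at hw hm hA hh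
      have hstep : bstep (w0, m0, bw0, bh0, ba0) (colrun s (x + ((k : Nat) : Int)) y 1) =
          (w0 + 1, min m0 (colrun s (x + ((k : Nat) : Int)) y 1),
            if (w0 + 1) * min m0 (colrun s (x + ((k : Nat) : Int)) y 1) > ba0 then
              ((w0 + 1), min m0 (colrun s (x + ((k : Nat) : Int)) y 1),
                (w0 + 1) * min m0 (colrun s (x + ((k : Nat) : Int)) y 1))
            else (bw0, bh0, ba0)) := by
        unfold bstep
        split <;> simp_all
      rw [hSt, hstep]
      subst hw
      constructor
      · rfl
      constructor
      · show min m0 _ = (bruns s x y (w0 + 1)).foldl min 1001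
        rw [hruns, List.foldl_append, ← hm]
        rfl
      · rw [hBL, hA]
        simp only [hh]
        by_cases hcmp : (w0 + 1) * min m0 (colrun s (x + ((w0 : Nat) : Int)) y 1) > ba0
        · simp [hcmp]
        · simp [hcmp]

-- the two markings coincide (Python ranges over the same nonnegative bounds)
theorem markA_eq_markB (p : PySem.Set (Int × Int)) (x y : Int) (bw bh : Nat) :
    markA p x y (bw : Int) (bh : Int) = markB p x y bw bh := by
  unfold markA markB
  rw [PySem.List.pyRange_zero_natCast bw, PySem.List.pyRange_zero_natCast bh]
  simp only [List.foldl_map]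

theorem stepA_eq_stepB (ws : PySem.Set (Int × Int)) : stepA ws = stepB ws := by
  funext st xy
  unfold stepA stepB
  by_cases hc : PySem.Set.contains st.1 (xy.1, xy.2) = true
  · rw [if_pos hc, if_pos hc]
  · rw [if_neg hc, if_neg hc]
    obtain ⟨-, -, hA⟩ := best_eq ws xy.1 xy.2 (maxWidthLoop ws xy.1 xy.2 (ws.length + 1) 1)
    have hsel : selB ((List.range (maxWidthLoop ws xy.1 xy.2 (ws.length + 1) 1)).map
        (fun dx => colrun ws (xy.1 + ((dx : Nat) : Int)) xy.2 1)) =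
        ((bSt ws xy.1 xy.2 (maxWidthLoop ws xy.1 xy.2 (ws.length + 1) 1)).2.2.1,
         (bSt ws xy.1 xy.2 (maxWidthLoop ws xy.1 xy.2 (ws.length + 1) 1)).2.2.2.1) := rfl
    simp only [hA, hsel]
    rw [show ∀ (xv yv wv hv : Int),
        PySem.Dict.getD (PySem.Dict.mk [("x",xv),("y",yv),("width",wv),("height",hv)]) "width" 0 = wv
      from fun _ _ _ _ => by simp [PySem.Dict.getD, PySem.Dict.get?]]
    rw [show ∀ (xv yv wv hv : Int),
        PySem.Dict.getD (PySem.Dict.mk [("x",xv),("y",yv),("width",wv),("height",hv)]) "height" 0 = hv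
      from fun _ _ _ _ => by simp [PySem.Dict.getD, PySem.Dict.get?]]
    rw [markA_eq_markB]

-- ===== VERDICT (by name: the statement is the Claim_ definition above) =====
theorem find_rectangular_walls_spec : Claim_equal_find_rectangular_walls := by
  intro l _
  unfold Spec_find_rectangular_walls find_rectangular_walls find_rectangular_walls_alt
  simp only [stepA_eq_stepB]
  split
  · rename_i hnil; subst hnil; rfl
  · rfl
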